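-- pv_equiv track=rewrite | github.com/blank-black/Privacy-protection-mechanism | flask_time.py | if_tweets_less_than_3
-- ===== SOURCE A (Python) =====
-- def if_tweets_less_than_3(tweets):
--     tweets_num = 0
--     for tweet in tweets:
--         tweets_num += 1
--     if tweets_num < 3:
--         return 1
--     else:
--         return 0
-- ===== SOURCE B (Python) =====
-- def if_tweets_less_than_3(tweets):
--     count = 0
--     for tweet in tweets:
--         count += 1
--         if count >= 3:
--             return 0
--     return 1
-- ===== Notes on version B (the rewrite author's own statement) =====
-- stated objective: faster
-- what changed: B stops counting and returns 0 as soon as the counter reaches 3, instead of exhausting the whole list before comparing; A counts all n elements.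
import Mathlib
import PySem

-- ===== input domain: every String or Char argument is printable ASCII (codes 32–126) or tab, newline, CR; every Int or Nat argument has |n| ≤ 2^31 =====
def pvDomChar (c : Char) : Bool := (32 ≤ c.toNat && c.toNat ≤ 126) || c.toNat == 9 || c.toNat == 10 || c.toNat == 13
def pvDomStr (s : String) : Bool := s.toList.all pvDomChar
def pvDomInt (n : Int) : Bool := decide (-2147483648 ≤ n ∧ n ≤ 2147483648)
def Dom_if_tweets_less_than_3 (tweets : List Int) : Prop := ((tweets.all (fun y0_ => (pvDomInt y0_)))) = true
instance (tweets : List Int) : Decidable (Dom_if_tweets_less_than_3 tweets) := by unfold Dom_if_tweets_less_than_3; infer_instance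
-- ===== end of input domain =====

-- B short-circuits: it returns 0 as soon as its counter reaches 3 instead of counting the whole list (faster).

-- ===== PORT A =====
-- counts every element, then compares once at the end
def if_tweets_less_than_3 (tweets : List Int) : Int :=
  let tweets_num := tweets.foldl (fun n _ => n + 1) (0 : Int)
  if tweets_num < 3 then 1 else 0

-- ===== PORT B =====
-- early-exit loop: `return 0` inside the loop once count reaches 3
def if_tweets_less_than_3_altGo (count : Int) : List Int → Int
  | [] => 1
  | _ :: rest =>
      if count + 1 ≥ 3 then 0 else if_tweets_less_than_3_altGo (count + 1) rest

def if_tweets_less_than_3_alt (tweets : List Int) : Int :=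
  if_tweets_less_than_3_altGo 0 tweets

-- ===== PRECONDITION & SPEC =====
def Spec_if_tweets_less_than_3 (tweets : List Int) (out : Int) : Prop := out = if_tweets_less_than_3_alt tweets
instance (tweets : List Int) (out : Int) : Decidable (Spec_if_tweets_less_than_3 tweets out) := by unfold Spec_if_tweets_less_than_3; infer_instance

-- ===== CLAIM (what is proved, stated in full; the proofs are below) =====
def Claim_equal_if_tweets_less_than_3 : Prop := ∀ (tweets : List Int), Dom_if_tweets_less_than_3 tweets → Spec_if_tweets_less_than_3 tweets (if_tweets_less_than_3 tweets)

-- ===== LEMMAS AND PROOFS =====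
theorem foldl_count (l : List Int) (c : Int) :
    l.foldl (fun n _ => n + 1) c = c + l.length := by
  induction l generalizing c with
  | nil => simp
  | cons a rest ih => simp [List.foldl, ih]; omega

theorem altGo_eq (l : List Int) (c : Int) (hc : c < 3) :
    if_tweets_less_than_3_altGo c l = if c + l.length < 3 then 1 else 0 := by
  induction l generalizing c with
  | nil => simp [if_tweets_less_than_3_altGo]; omega
  | cons a rest ih =>
    simp only [if_tweets_less_than_3_altGo]
    by_cases h : c + 1 ≥ 3
    · simp only [if_pos h]
      have : ¬ (c + ((a :: rest).length : Int) < 3) := by simp; omega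
      rw [if_neg this]
    · have h1 : c + 1 < 3 := by omega
      rw [if_neg h, ih (c + 1) h1]
      simp
      omega

-- ===== VERDICT (by name: the statement is the Claim_ definition above) =====
theorem if_tweets_less_than_3_spec : Claim_equal_if_tweets_less_than_3 := by
  intro tweets _
  unfold Spec_if_tweets_less_than_3 if_tweets_less_than_3 if_tweets_less_than_3_alt
  rw [foldl_count, altGo_eq tweets 0 (by omega)]
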